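-- pv_equiv track=rewrite | github.com/jjongs2/leetcode | 1942-the-number-of-the-smallest-unoccupied-chair/1942-the-number-of-the-smallest-unoccupied-chair.py | smallestChair
-- ===== SOURCE A (Python) =====
-- from typing import List
--
-- from heapq import heappop, heappush
--
-- def smallestChair(times: List[List[int]], targetFriend: int) -> int:
--     events = []
--     for friend, (arrival, leaving) in enumerate(times):
--         events.append((leaving, 0, friend))
--         events.append((arrival, 1, friend))
--     events.sort()
--     seats = dict()
--     unoccupied = list(range(len(times)))
--     for time, event_type, friend in events:
--         if event_type == 0:
--             heappush(unoccupied, seats.pop(friend))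
--         else:
--             seats[friend] = heappop(unoccupied)
--             if friend == targetFriend:
--                 return seats[targetFriend]
-- ===== SOURCE B (Python) =====
-- from typing import List
--
-- def smallestChair(times: List[List[int]], targetFriend: int) -> int:
--     n = len(times)
--     free_at = [None] * n
--     for f in sorted(range(n), key=lambda f: (times[f][0], f)):
--         arrival, leaving = times[f]
--         for i in range(n):
--             if free_at[i] is None or free_at[i] <= arrival:
--                 if f == targetFriend:
--                     return i
--                 free_at[i] = leaving
--                 break
-- ===== Notes on version B (the rewrite author's own statement) =====
-- stated objective: simpler
-- what changed: B drops A's event list (two events per friend, global sort, heap of free chairs, seats dict): it sorts only the friends by (arrival, index) and keeps a per-chair free-time array, scanning it for the first chair whose free time is at or before the arrival.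
-- outside the precondition, e.g. on smallestChair([[1, 1], [0, 5]], 1): A returns 0, B returns 0; on smallestChair([[2, 2]], 0): A raises KeyError, B returns 0
import Mathlib
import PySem

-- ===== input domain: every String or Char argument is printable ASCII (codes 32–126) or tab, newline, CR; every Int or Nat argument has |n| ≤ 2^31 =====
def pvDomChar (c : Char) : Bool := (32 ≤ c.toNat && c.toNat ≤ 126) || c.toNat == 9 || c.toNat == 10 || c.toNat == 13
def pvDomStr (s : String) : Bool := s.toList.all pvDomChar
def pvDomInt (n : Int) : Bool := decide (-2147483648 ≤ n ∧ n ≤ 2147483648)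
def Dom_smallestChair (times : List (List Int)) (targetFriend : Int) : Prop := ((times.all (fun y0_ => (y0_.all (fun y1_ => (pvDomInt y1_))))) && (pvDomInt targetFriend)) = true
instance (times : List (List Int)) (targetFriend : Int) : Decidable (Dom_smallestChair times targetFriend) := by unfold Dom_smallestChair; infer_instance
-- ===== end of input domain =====

-- B replaces A's event list + heap sweep by a single pass over the friends in arrival order
-- with a per-chair free-time array (objective: simpler — no heap, no leave events).

-- ===== PORT A =====
-- Python compares the (time, event_type, friend) tuples lexicographically: the Lex order on Int × Int × Int.
def evKey (e : Int × Int × Int) : Lex (Int × Lex (Int × Int)) := toLex (e.1, toLex (e.2.1, e.2.2))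

-- heapq on a list of ints observed only through heappop: heappop returns the minimum
-- (none = IndexError on an empty heap); heappush adds the element.
def heapPop (h : List Int) : Option (Int × List Int) :=
  match PySem.List.min? h (fun x => x) with
  | none => none
  | some m => some (m, h.erase m)

-- the event loop of A; returns at the target's arrival event, none when the loop falls through
def aloop (tgt : Int) : List (Int × Int × Int) → PySem.Dict Int Int → List Int → Option Int
  | [], _, _ => none
  | (_, ty, f) :: rest, seats, unocc =>
    if ty == 0 then
      match seats.pop? f with
      | none => none        -- Python: KeyError here (outside Pre_)
      | some (c, seats') => aloop tgt rest seats' (unocc ++ [c])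
    else
      match heapPop unocc with
      | none => none        -- Python: IndexError here (outside Pre_)
      | some (c, unocc') =>
        if f == tgt then some c else aloop tgt rest (seats.insert f c) unocc'

def smallestChair (times : List (List Int)) (targetFriend : Int) : Option Int :=
  -- rows are read with pyGetD; exact whenever every row has length 2 (Pre_), where Python's unpacking succeeds
  let events := (PySem.List.enumerate times).foldl
    (fun acc p => acc ++ [(PySem.List.pyGetD p.2 1 0, 0, p.1), (PySem.List.pyGetD p.2 0 0, 1, p.1)]) []
  let sortedEvents := PySem.List.sorted events evKey
  aloop targetFriend sortedEvents PySem.Dict.empty (PySem.List.pyRange 0 (times.length : Int))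

-- ===== PORT B =====
-- index of the first chair free at time `a` (free_at[i] is None or free_at[i] <= arrival)
def findFree (a : Int) : List (Option Int) → Option Nat
  | [] => none
  | o :: rest =>
    if (match o with | none => true | some v => decide (v ≤ a)) then some 0
    else (findFree a rest).map (fun i => i + 1)

-- one pass over the friends in arrival order, updating the free-time array
def bloop (times : List (List Int)) (tgt : Int) : List Int → List (Option Int) → Option Int
  | [], _ => none
  | f :: rest, freeAt =>
    let row := PySem.List.pyGetD times f []
    let arrival := PySem.List.pyGetD row 0 0
    let leaving := PySem.List.pyGetD row 1 0
    match findFree arrival freeAt with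
    | none => bloop times tgt rest freeAt          -- no chair free: fall through (unreachable under Pre_)
    | some i =>
      if f == tgt then some (i : Int)
      else bloop times tgt rest (freeAt.set i (some leaving))

def smallestChair_alt (times : List (List Int)) (targetFriend : Int) : Option Int :=
  let n := times.length
  let order := PySem.List.sorted (PySem.List.pyRange 0 (n : Int))
      (fun f => toLex (PySem.List.pyGetD (PySem.List.pyGetD times f []) 0 0, f))
  bloop times targetFriend order (List.replicate n none)

-- ===== PRECONDITION & SPEC =====
-- Pre_ excludes inputs with a malformed row (length ≠ 2: Python's tuple unpacking raises ValueError)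
-- or a row with leaving ≤ arrival, on which A raises KeyError at that friend's leave event unless
-- the target happens to be seated first.
def Pre_smallestChair (times : List (List Int)) (targetFriend : Int) : Prop :=
  ∀ r ∈ times, r.length = 2 ∧ PySem.List.pyGetD r 0 0 < PySem.List.pyGetD r 1 0
instance (times : List (List Int)) (targetFriend : Int) : Decidable (Pre_smallestChair times targetFriend) := by
  unfold Pre_smallestChair; infer_instance

def pvWitness_smallestChair : List (List Int) × Int := ([[1, 4], [2, 3], [4, 5]], 1)

def Spec_smallestChair (times : List (List Int)) (targetFriend : Int) (out : Option Int) : Prop := out = smallestChair_alt times targetFriend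
instance (times : List (List Int)) (targetFriend : Int) (out : Option Int) : Decidable (Spec_smallestChair times targetFriend out) := by unfold Spec_smallestChair; infer_instance

-- ===== CLAIM (what is proved, stated in full; the proofs are below) =====
def Claim_equal_smallestChair : Prop := ∀ (times : List (List Int)) (targetFriend : Int), Dom_smallestChair times targetFriend → Pre_smallestChair times targetFriend → Spec_smallestChair times targetFriend (smallestChair times targetFriend)

-- ===== LEMMAS AND PROOFS =====

-- row / arrival / leaving of friend f, as the ports read them
def rowT (times : List (List Int)) (f : Int) : List Int := PySem.List.pyGetD times f []
def arrT (times : List (List Int)) (f : Int) : Int := PySem.List.pyGetD (rowT times f) 0 0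
def lvT (times : List (List Int)) (f : Int) : Int := PySem.List.pyGetD (rowT times f) 1 0

-- the two events of friend f, in the order A appends them
def EvT (times : List (List Int)) (f : Int) : List (Int × Int × Int) :=
  [(lvT times f, 0, f), (arrT times f, 1, f)]

-- the simulation invariant tying A's state (E, seats, heap) to B's state (ord, freeAt)
structure SCInv (times : List (List Int)) (E : List (Int × Int × Int)) (seats : PySem.Dict Int Int)
    (heap : List Int) (ord : List Int) (freeAt : List (Option Int)) : Prop where
  hlen : freeAt.length = times.length
  hperm : E.Perm (seats.items.map (fun p => (lvT times p.1, 0, p.1)) ++ ord.flatMap (EvT times))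
  hsorted : E.Pairwise (fun e e' => evKey e < evKey e')
  hordMem : ∀ f ∈ ord, 0 ≤ f ∧ f < (times.length : Int)
  hordSorted : ord.Pairwise (fun f g => toLex (arrT times f, f) < toLex (arrT times g, g))
  hkeysNodup : (seats.items.map (fun p => p.1)).Nodup
  hvalsNodup : (seats.items.map (fun p => p.2)).Nodup
  hseatRange : ∀ p ∈ seats.items, 0 ≤ p.1 ∧ p.1 < (times.length : Int) ∧ 0 ≤ p.2 ∧ p.2 < (times.length : Int)
  hseatChair : ∀ p ∈ seats.items, freeAt[p.2.toNat]? = some (some (lvT times p.1))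
  hkeysDisj : ∀ p ∈ seats.items, p.1 ∉ ord
  hheapNodup : heap.Nodup
  hheapMem : ∀ x : Int, x ∈ heap ↔ (0 ≤ x ∧ x < (times.length : Int) ∧ x ∉ seats.items.map (fun p => p.2))
  hfree : ∀ k : Nat, k < times.length → ((k : Int) ∉ seats.items.map (fun p => p.2)) →
      ∀ f ∈ ord, ∀ v : Int, freeAt[k]? = some (some v) → v ≤ arrT times f

lemma evKey_lt_iff (e e' : Int × Int × Int) :
    evKey e < evKey e' ↔ (e.1 < e'.1 ∨ (e.1 = e'.1 ∧ (e.2.1 < e'.2.1 ∨ (e.2.1 = e'.2.1 ∧ e.2.2 < e'.2.2)))) := by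
  simp [evKey, Prod.Lex.toLex_lt_toLex]

lemma evKey_inj : Function.Injective evKey := by
  intro a b h
  simp only [evKey] at h
  have h1 : (a.1, toLex (a.2.1, a.2.2)) = (b.1, toLex (b.2.1, b.2.2)) := by simpa using h
  have h2 := congrArg Prod.fst h1
  have h3 : toLex (a.2.1, a.2.2) = toLex (b.2.1, b.2.2) := congrArg Prod.snd h1
  have h4 : (a.2.1, a.2.2) = (b.2.1, b.2.2) := by simpa using h3
  exact Prod.ext h2 (Prod.ext (congrArg Prod.fst h4) (congrArg Prod.snd h4))

lemma filter_key_perm {ν : Type} : ∀ {items : List (Int × ν)} {f : Int} {c : ν},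
    (items.map (fun p => p.1)).Nodup → (f, c) ∈ items →
    items.Perm ((f, c) :: items.filter (fun p => !(p.1 == f)))
  | [], _, _, _, hm => absurd hm (List.not_mem_nil)
  | q :: items, f, c, hnd, hm => by
    have hnd2 : (q.1 :: items.map (fun p => p.1)).Nodup := by simpa using hnd
    have hq1 : q.1 ∉ items.map (fun p => p.1) := (List.nodup_cons.1 hnd2).1
    have htl : (items.map (fun p => p.1)).Nodup := (List.nodup_cons.1 hnd2).2
    rcases List.mem_cons.1 hm with h | h
    · subst h
      have : items.filter (fun p => !(p.1 == f)) = items := by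
        refine List.filter_eq_self.2 (fun p hp => ?_)
        have : p.1 ≠ f := by
          intro hpf
          exact hq1 (List.mem_map.2 ⟨p, hp, by simpa using hpf⟩)
        simpa using this
      simp [this]
    · have hqf : q.1 ≠ f := by
        intro hqf
        exact hq1 (hqf ▸ List.mem_map.2 ⟨(f, c), h, rfl⟩)
      have ih := filter_key_perm (ν := ν) htl h
      have hfil : (q :: items).filter (fun p => !(p.1 == f)) = q :: items.filter (fun p => !(p.1 == f)) := by
        simp [hqf]
      rw [hfil]
      exact (ih.cons q).trans (List.Perm.swap _ _ _)

def freeB (a : Int) (o : Option Int) : Bool := match o with | none => true | some v => decide (v ≤ a)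

lemma findFree_eq_some_iff (a : Int) : ∀ (l : List (Option Int)) (k : Nat),
    findFree a l = some k ↔
      ((∃ o, l[k]? = some o ∧ freeB a o = true) ∧ ∀ j < k, ∀ o, l[j]? = some o → freeB a o = false)
  | [], k => by simp [findFree]
  | o :: rest, k => by
    have hcons : findFree a (o :: rest) = if freeB a o then some 0 else (findFree a rest).map (fun i => i + 1) := rfl
    rw [hcons]
    cases hfo : freeB a o with
    | true =>
      rw [if_pos rfl]
      cases k with
      | zero => simp [hfo]
      | succ k =>
        constructor
        · intro hk; simp at hk
        · rintro ⟨-, hall⟩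
          exact absurd hfo (by simpa using hall 0 (Nat.succ_pos k) o rfl)
    | false =>
      rw [if_neg (by simp)]
      cases k with
      | zero =>
        constructor
        · intro hk
          rcases Option.map_eq_some_iff.1 hk with ⟨i, -, hi⟩
          omega
        · rintro ⟨⟨o', ho', hfo'⟩, -⟩
          simp only [List.getElem?_cons_zero, Option.some.injEq] at ho'
          subst ho'
          rw [hfo] at hfo'; exact absurd hfo' (by simp)
      | succ k =>
        have hmap : ((findFree a rest).map (fun i => i + 1) = some (k + 1)) ↔ findFree a rest = some k := by
          cases hfk : findFree a rest <;> simp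
        rw [hmap, findFree_eq_some_iff a rest k]
        constructor
        · rintro ⟨h1, h2⟩
          refine ⟨by simpa using h1, ?_⟩
          intro j hj o' ho'
          cases j with
          | zero =>
            simp only [List.getElem?_cons_zero, Option.some.injEq] at ho'
            subst ho'; exact hfo
          | succ j => exact h2 j (by omega) o' (by simpa using ho')
        · rintro ⟨h1, h2⟩
          refine ⟨by simpa using h1, ?_⟩
          intro j hj o' ho'
          exact h2 (j + 1) (by omega) o' (by simpa using ho')

lemma rowT_mem (times : List (List Int)) (f : Int) (h0 : 0 ≤ f) (h1 : f < (times.length : Int)) :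
    rowT times f ∈ times := by
  rw [rowT, PySem.List.pyGetD_of_nonneg _ _ h0]
  have hlt : f.toNat < times.length := by omega
  rw [List.getD_eq_getElem _ _ hlt]
  exact List.getElem_mem hlt

lemma pre_arr_lt_lv {times : List (List Int)} {tgt : Int} (hPre : Pre_smallestChair times tgt)
    {f : Int} (h0 : 0 ≤ f) (h1 : f < (times.length : Int)) : arrT times f < lvT times f :=
  (hPre _ (rowT_mem times f h0 h1)).2

-- the main simulation: A's event sweep equals B's arrival-order pass
theorem sc_main (times : List (List Int)) (tgt : Int) (hPre : Pre_smallestChair times tgt) :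
    ∀ (E : List (Int × Int × Int)) (seats : PySem.Dict Int Int) (heap : List Int)
      (ord : List Int) (freeAt : List (Option Int)),
      SCInv times E seats heap ord freeAt →
      aloop tgt E seats heap = bloop times tgt ord freeAt := by
  intro E
  induction E with
  | nil =>
    intro seats heap ord freeAt inv
    have h := inv.hperm.symm.eq_nil
    rcases List.append_eq_nil_iff.1 h with ⟨-, h2⟩
    cases ord with
    | nil => simp [aloop, bloop]
    | cons f ord' => simp [EvT] at h2
  | cons e E' ih =>
    intro seats heap ord freeAt inv
    obtain ⟨t, ty, f⟩ := e
    have hheadmem : (t, ty, f) ∈ seats.items.map (fun p => (lvT times p.1, 0, p.1)) ++ ord.flatMap (EvT times) :=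
      inv.hperm.mem_iff.1 (List.mem_cons_self)
    have hsortedtail : ∀ x ∈ E', evKey (t, ty, f) < evKey x := (List.pairwise_cons.1 inv.hsorted).1
    have hsorted' : E'.Pairwise (fun e e' => evKey e < evKey e') := (List.pairwise_cons.1 inv.hsorted).2
    have hlate : ∀ x ∈ seats.items.map (fun p => (lvT times p.1, 0, p.1)) ++ ord.flatMap (EvT times),
        x ≠ (t, ty, f) → evKey (t, ty, f) < evKey x := by
      intro x hx hne
      rcases List.mem_cons.1 (inv.hperm.symm.subset hx) with h | h
      · exact absurd h hne
      · exact hsortedtail x h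
    by_cases hty : ty = 0
    · -- leave event: f is seated; A pushes f's chair back, B's state is unchanged
      subst hty
      have hseated : ∃ c, (f, c) ∈ seats.items ∧ t = lvT times f := by
        rcases List.mem_append.1 hheadmem with hs | hf
        · rcases List.mem_map.1 hs with ⟨p, hp, heq⟩
          rcases Prod.mk.injEq .. ▸ heq with ⟨h1, h2⟩
          obtain ⟨h3, h4⟩ := Prod.mk.injEq .. ▸ h2
          refine ⟨p.2, ?_, ?_⟩
          · rw [← h4]; simpa using hp
          · exact (h4 ▸ h1).symm
        · exfalso
          rcases List.mem_flatMap.1 hf with ⟨g, hg, hEg⟩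
          rcases List.mem_cons.1 hEg with h | h
          · obtain ⟨h1, h2⟩ := Prod.mk.injEq .. ▸ h
            obtain ⟨h3, h4⟩ := Prod.mk.injEq .. ▸ h2
            subst h4
            have hb := inv.hordMem f hg
            have hAf : (arrT times f, 1, f) ∈ seats.items.map (fun p => (lvT times p.1, 0, p.1)) ++ ord.flatMap (EvT times) :=
              List.mem_append_right _ (List.mem_flatMap.2 ⟨f, hg, by simp [EvT]⟩)
            have hlt := hlate _ hAf (by simp)
            rw [evKey_lt_iff] at hlt
            have hpre := pre_arr_lt_lv hPre hb.1 hb.2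
            simp only [← h1] at hpre
            rcases hlt with h | ⟨h, hr⟩
            · omega
            · rcases hr with h' | ⟨h', -⟩ <;> omega
          · rcases List.mem_singleton.1 h with h
            obtain ⟨-, h2⟩ := Prod.mk.injEq .. ▸ h
            obtain ⟨h3, -⟩ := Prod.mk.injEq .. ▸ h2
            exact absurd h3 (by norm_num)
      obtain ⟨c, hmem, hteq⟩ := hseated
      subst hteq
      have hget : seats.get? f = some c :=
        PySem.Dict.get?_of_mem_items seats hmem (by simpa [PySem.Dict.keys] using inv.hkeysNodup)
      have hstep : aloop tgt ((lvT times f, 0, f) :: E') seats heap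
          = aloop tgt E' (seats.erase f) (heap ++ [c]) := by
        simp [aloop, PySem.Dict.pop?, hget]
      rw [hstep]
      have hpermItems : seats.items.Perm ((f, c) :: (seats.items.filter (fun p => !(p.1 == f)))) :=
        filter_key_perm inv.hkeysNodup hmem
      have heraseItems : (seats.erase f).items = seats.items.filter (fun p => !(p.1 == f)) := by
        simp [PySem.Dict.erase]
      have hcvals : c ∈ seats.items.map (fun p => p.2) := List.mem_map.2 ⟨(f, c), hmem, rfl⟩
      have hvalsPerm : (seats.items.map (fun p => p.2)).Perm
          (c :: (seats.items.filter (fun p => !(p.1 == f))).map (fun p => p.2)) := by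
        simpa using hpermItems.map (fun p => p.2)
      have hcnotin : c ∉ (seats.items.filter (fun p => !(p.1 == f))).map (fun p => p.2) :=
        (List.nodup_cons.1 ((hvalsPerm.nodup_iff).1 inv.hvalsNodup)).1
      have hsubf : ∀ p ∈ seats.items.filter (fun p => !(p.1 == f)), p ∈ seats.items :=
        fun p hp => List.mem_of_mem_filter hp
      refine ih (seats.erase f) (heap ++ [c]) ord freeAt ?_
      refine ⟨inv.hlen, ?_, hsorted', inv.hordMem, inv.hordSorted, ?_, ?_, ?_, ?_, ?_, ?_, ?_, ?_⟩
      · -- hperm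
        rw [heraseItems]
        have h1 := (hpermItems.map (fun p => (lvT times p.1, 0, p.1))).append_right (ord.flatMap (EvT times))
        have h2 := inv.hperm.trans h1
        simpa using h2.cons_inv
      · rw [heraseItems]
        exact ((List.filter_sublist).map _).nodup inv.hkeysNodup
      · rw [heraseItems]
        exact ((List.filter_sublist).map _).nodup inv.hvalsNodup
      · rw [heraseItems]; exact fun p hp => inv.hseatRange p (hsubf p hp)
      · rw [heraseItems]; exact fun p hp => inv.hseatChair p (hsubf p hp)
      · rw [heraseItems]; exact fun p hp => inv.hkeysDisj p (hsubf p hp)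
      · -- heap nodup
        rw [List.nodup_append]
        refine ⟨inv.hheapNodup, by simp, ?_⟩
        intro a ha b hb hab
        apply ((inv.hheapMem a).1 ha).2.2
        rw [hab, List.mem_singleton.1 hb]
        exact hcvals
      · -- heap membership
        intro x
        rw [heraseItems]
        constructor
        · intro hx
          rcases List.mem_append.1 hx with hx | hx
          · obtain ⟨h1, h2, h3⟩ := (inv.hheapMem x).1 hx
            exact ⟨h1, h2, fun hmem' => h3 (List.mem_map.2 (by
              rcases List.mem_map.1 hmem' with ⟨p, hp, hpe⟩
              exact ⟨p, hsubf p hp, hpe⟩))⟩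
          · have hxc : x = c := List.mem_singleton.1 hx
            obtain ⟨-, -, h1, h2⟩ := inv.hseatRange (f, c) hmem
            exact ⟨by rw [hxc]; exact h1, by rw [hxc]; exact h2, by rw [hxc]; exact hcnotin⟩
        · rintro ⟨h1, h2, h3⟩
          by_cases hxc : x = c
          · subst hxc; exact List.mem_append_right _ (List.mem_singleton.2 rfl)
          · refine List.mem_append_left _ ((inv.hheapMem x).2 ⟨h1, h2, ?_⟩)
            intro hxv
            rcases List.mem_cons.1 (hvalsPerm.subset hxv) with h | h
            · exact hxc h
            · exact h3 h
      · -- hfree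
        intro k hk hknot f' hf' v hv
        rw [heraseItems] at hknot
        by_cases hkc : (k : Int) = c
        · have hcc := inv.hseatChair (f, c) hmem
          have hc0 : 0 ≤ c := (inv.hseatRange (f, c) hmem).2.2.1
          have hck : c.toNat = k := by omega
          rw [hck] at hcc
          rw [hv] at hcc
          have hvv : v = lvT times f := by
            have := Option.some.inj (Option.some.inj hcc)
            omega
          subst hvv
          have hAf : (arrT times f', 1, f') ∈ seats.items.map (fun p => (lvT times p.1, 0, p.1)) ++ ord.flatMap (EvT times) :=
            List.mem_append_right _ (List.mem_flatMap.2 ⟨f', hf', by simp [EvT]⟩)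
          have hlt := hlate _ hAf (by simp)
          rw [evKey_lt_iff] at hlt
          rcases hlt with h | ⟨h, hr⟩
          · exact le_of_lt h
          · exact le_of_eq h
        · refine inv.hfree k hk ?_ f' hf' v hv
          intro hkv
          rcases List.mem_cons.1 (hvalsPerm.subset hkv) with h | h
          · exact hkc h
          · exact hknot h
    · -- arrival event: the head of the event list is the arrival of the next friend in arrival order
      have hty1 : ty = 1 ∧ t = arrT times f ∧ f ∈ ord := by
        rcases List.mem_append.1 hheadmem with hs | hf2
        · exfalso
          rcases List.mem_map.1 hs with ⟨p, hp, heq⟩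
          obtain ⟨-, h2⟩ := Prod.mk.injEq .. ▸ heq
          obtain ⟨h3, -⟩ := Prod.mk.injEq .. ▸ h2
          exact hty h3.symm
        · rcases List.mem_flatMap.1 hf2 with ⟨g, hg, hEg⟩
          rcases List.mem_cons.1 hEg with h | h
          · exfalso
            obtain ⟨-, h2⟩ := Prod.mk.injEq .. ▸ h
            obtain ⟨h3, -⟩ := Prod.mk.injEq .. ▸ h2
            exact hty h3
          · have h := List.mem_singleton.1 h
            obtain ⟨h1, h2⟩ := Prod.mk.injEq .. ▸ h
            obtain ⟨h3, h4⟩ := Prod.mk.injEq .. ▸ h2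
            exact ⟨h3, (h4 ▸ h1), h4 ▸ hg⟩
      obtain ⟨hty1, hteq, hford⟩ := hty1
      subst hty1
      subst hteq
      obtain ⟨ord', hord⟩ : ∃ ord', ord = f :: ord' := by
        cases ord with
        | nil => simp at hford
        | cons h0 ord' =>
          refine ⟨ord', ?_⟩
          by_cases hh : h0 = f
          · rw [hh]
          · exfalso
            have hford' : f ∈ ord' := by
              rcases List.mem_cons.1 hford with h | h
              · exact absurd h.symm hh
              · exact h
            have hA : (arrT times h0, 1, h0) ∈ seats.items.map (fun p => (lvT times p.1, 0, p.1)) ++ (h0 :: ord').flatMap (EvT times) :=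
              List.mem_append_right _ (List.mem_flatMap.2 ⟨h0, List.mem_cons_self, by simp [EvT]⟩)
            have hlt := hlate _ hA (by
              intro he
              obtain ⟨-, h2⟩ := Prod.mk.injEq .. ▸ he
              obtain ⟨-, h4⟩ := Prod.mk.injEq .. ▸ h2
              exact hh h4)
            rw [evKey_lt_iff] at hlt
            have hpair := (List.pairwise_cons.1 inv.hordSorted).1 f hford'
            rw [Prod.Lex.toLex_lt_toLex] at hpair
            simp only at hlt hpair
            omega
      subst hord
      have hf0 : 0 ≤ f ∧ f < (times.length : Int) := inv.hordMem f List.mem_cons_self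
      have hfnotk : f ∉ seats.items.map (fun p => p.1) := by
        intro hfk
        rcases List.mem_map.1 hfk with ⟨p, hp, hpe⟩
        exact inv.hkeysDisj p hp (by rw [hpe]; exact List.mem_cons_self)
      have hrangelen : (PySem.List.pyRange 0 (times.length : Int)).length = times.length := by
        rw [PySem.List.length_pyRange_one]; omega
      have hkeysub : ∀ x ∈ f :: seats.items.map (fun p => p.1), x ∈ PySem.List.pyRange 0 (times.length : Int) := by
        intro x hx
        rcases List.mem_cons.1 hx with h | h
        · subst h; exact PySem.List.mem_pyRange_one.2 ⟨hf0.1, hf0.2⟩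
        · rcases List.mem_map.1 h with ⟨p, hp, hpe⟩
          obtain ⟨h1, h2, -, -⟩ := inv.hseatRange p hp
          exact PySem.List.mem_pyRange_one.2 ⟨by omega, by omega⟩
      have hkeylen : (f :: seats.items.map (fun p => p.1)).length ≤ (PySem.List.pyRange 0 (times.length : Int)).length := by
        classical
        exact List.Subperm.length_le
          (List.subperm_of_subset (List.nodup_cons.2 ⟨hfnotk, inv.hkeysNodup⟩) hkeysub)
      have hvallen : seats.items.length + 1 ≤ times.length := by
        simp [hrangelen] at hkeylen
        omega
      have hex : ∃ k : Nat, k < times.length ∧ ((k : Nat) : Int) ∉ seats.items.map (fun p => p.2) := by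
        by_contra hno
        push Not at hno
        have hsub2 : ∀ x ∈ PySem.List.pyRange 0 (times.length : Int), x ∈ seats.items.map (fun p => p.2) := by
          intro x hx
          obtain ⟨hx0, hx1⟩ := PySem.List.mem_pyRange_one.1 hx
          have := hno x.toNat (by omega)
          rwa [Int.toNat_of_nonneg hx0] at this
        have hle := List.Subperm.length_le
          (List.subperm_of_subset (PySem.List.nodup_pyRange_one 0 _) hsub2)
        rw [hrangelen] at hle
        simp at hle
        omega
      obtain ⟨k0, hk0, hk0v⟩ := hex
      have hk0heap : ((k0 : Nat) : Int) ∈ heap := (inv.hheapMem _).2 ⟨by omega, by omega, hk0v⟩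
      cases hmin : PySem.List.min? heap (fun x => x) with
      | none =>
        rw [(PySem.List.min?_eq_none_iff heap _).1 hmin] at hk0heap
        exact absurd hk0heap List.not_mem_nil
      | some m =>
        have hmmem := PySem.List.min?_mem hmin
        have hmisMin : ∀ y ∈ heap, m ≤ y := PySem.List.min?_isMin hmin
        obtain ⟨hm0, hmn, hmvals⟩ := (inv.hheapMem m).1 hmmem
        have hmtoNat : ((m.toNat : Nat) : Int) = m := Int.toNat_of_nonneg hm0
        have hstep : aloop tgt ((arrT times f, 1, f) :: E') seats heap =
            (if f = tgt then some m else aloop tgt E' (seats.insert f m) (heap.erase m)) := by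
          simp [aloop, heapPop, hmin]
        have hseatedLate : ∀ p ∈ seats.items, arrT times f < lvT times p.1 := by
          intro p hp
          have hL : (lvT times p.1, 0, p.1) ∈ seats.items.map (fun p => (lvT times p.1, 0, p.1)) ++ (f :: ord').flatMap (EvT times) :=
            List.mem_append_left _ (List.mem_map.2 ⟨p, hp, rfl⟩)
          have hlt := hlate _ hL (by simp)
          rw [evKey_lt_iff] at hlt
          simp only at hlt
          omega
        have hff : findFree (PySem.List.pyGetD (PySem.List.pyGetD times f []) 0 0) freeAt = some m.toNat := by
          rw [findFree_eq_some_iff]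
          constructor
          · have hlt : m.toNat < freeAt.length := by have := inv.hlen; omega
            refine ⟨freeAt[m.toNat], List.getElem?_eq_getElem hlt, ?_⟩
            cases ho : freeAt[m.toNat] with
            | none => rfl
            | some v =>
              have hv := inv.hfree m.toNat (by omega) (by rwa [hmtoNat]) f List.mem_cons_self v
                (by rw [List.getElem?_eq_getElem hlt, ho])
              simpa [freeB, arrT, rowT] using hv
          · intro j hj o ho
            by_contra hfb
            have hfb' : freeB (PySem.List.pyGetD (PySem.List.pyGetD times f []) 0 0) o = true := by
              revert hfb; cases freeB (PySem.List.pyGetD (PySem.List.pyGetD times f []) 0 0) o <;> simp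
            have hjvals : ((j : Nat) : Int) ∉ seats.items.map (fun p => p.2) := by
              intro hjv
              rcases List.mem_map.1 hjv with ⟨p, hp, hpe⟩
              have hchair := inv.hseatChair p hp
              have hp2 : p.2.toNat = j := by
                have := (inv.hseatRange p hp).2.2.1
                omega
              rw [hp2, ho] at hchair
              have ho2 : o = some (lvT times p.1) := Option.some.inj hchair
              have hlate2 := hseatedLate p hp
              rw [ho2] at hfb'
              have hle : lvT times p.1 ≤ arrT times f := by simpa [freeB, arrT, rowT] using hfb'
              omega
            have hjheap : ((j : Nat) : Int) ∈ heap := (inv.hheapMem _).2 ⟨by omega, by omega, hjvals⟩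
            have := hmisMin _ hjheap
            omega
        have hbstep : bloop times tgt (f :: ord') freeAt =
            (if f = tgt then some ((m.toNat : Nat) : Int)
             else bloop times tgt ord' (freeAt.set m.toNat (some (PySem.List.pyGetD (PySem.List.pyGetD times f []) 1 0)))) := by
          simp [bloop, hff]
        rw [hstep, hbstep]
        by_cases hft : f = tgt
        · simp [hft, hmtoNat]
        · rw [if_neg hft, if_neg hft]
          have hnotcont : seats.contains f = false := by
            cases hc : seats.contains f
            · rfl
            · exact absurd (by simpa [PySem.Dict.keys] using (PySem.Dict.contains_iff_mem_keys seats f).1 hc) hfnotk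
          have hins : (seats.insert f m).items = seats.items ++ [(f, m)] :=
            PySem.Dict.items_insert_of_not_contains seats m hnotcont
          have hordMem' : ∀ g ∈ ord', 0 ≤ g ∧ g < (times.length : Int) :=
            fun g hg => inv.hordMem g (List.mem_cons_of_mem _ hg)
          have hordSorted' := (List.pairwise_cons.1 inv.hordSorted).2
          have hfnotord' : f ∉ ord' := by
            intro hmem'
            exact absurd ((List.pairwise_cons.1 inv.hordSorted).1 f hmem') (lt_irrefl _)
          apply ih
          refine ⟨by simp [inv.hlen], ?_, hsorted', hordMem', hordSorted', ?_, ?_, ?_, ?_, ?_, ?_, ?_, ?_⟩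
          · -- hperm
            have htgt : (seats.insert f m).items.map (fun p => (lvT times p.1, 0, p.1)) ++ ord'.flatMap (EvT times)
                = (seats.items.map (fun p => (lvT times p.1, 0, p.1)) ++ [((lvT times f : Int), (0 : Int), f)]) ++ ord'.flatMap (EvT times) := by
              rw [hins]; simp
            rw [htgt]
            apply List.Perm.cons_inv (a := ((arrT times f : Int), (1 : Int), f))
            refine inv.hperm.trans ?_
            rw [List.flatMap_cons]
            have hsplit : seats.items.map (fun p => (lvT times p.1, 0, p.1)) ++ (EvT times f ++ ord'.flatMap (EvT times))
                = (seats.items.map (fun p => (lvT times p.1, 0, p.1)) ++ [((lvT times f : Int), (0 : Int), f)]) ++ (((arrT times f : Int), (1 : Int), f) :: ord'.flatMap (EvT times)) := by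
              simp [EvT]
            rw [hsplit]
            exact List.perm_middle
          · rw [hins, List.map_append, List.nodup_append]
            refine ⟨inv.hkeysNodup, by simp, ?_⟩
            intro a ha b hb
            simp only [List.map_cons, List.map_nil, List.mem_singleton] at hb
            subst hb
            intro he
            exact hfnotk (he ▸ ha)
          · rw [hins, List.map_append, List.nodup_append]
            refine ⟨inv.hvalsNodup, by simp, ?_⟩
            intro a ha b hb
            simp only [List.map_cons, List.map_nil, List.mem_singleton] at hb
            subst hb
            intro he
            exact hmvals (he ▸ ha)
          · rw [hins]
            intro p hp
            rcases List.mem_append.1 hp with h | h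
            · exact inv.hseatRange p h
            · have := List.mem_singleton.1 h
              subst this
              exact ⟨hf0.1, hf0.2, hm0, hmn⟩
          · rw [hins]
            intro p hp
            rcases List.mem_append.1 hp with h | h
            · have hpm : p.2 ≠ m := by
                intro hpe
                exact hmvals (List.mem_map.2 ⟨p, h, hpe⟩)
              have hpnat : p.2.toNat ≠ m.toNat := by
                have := (inv.hseatRange p h).2.2.1
                omega
              rw [List.getElem?_set_ne (Ne.symm hpnat)]
              exact inv.hseatChair p h
            · have := List.mem_singleton.1 h
              subst this
              simp only
              rw [List.getElem?_set_self (by have := inv.hlen; omega)]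
              rfl
          · rw [hins]
            intro p hp
            rcases List.mem_append.1 hp with h | h
            · exact fun hm' => inv.hkeysDisj p h (List.mem_cons_of_mem _ hm')
            · have := List.mem_singleton.1 h
              subst this
              exact hfnotord'
          · exact inv.hheapNodup.erase m
          · intro x
            rw [inv.hheapNodup.mem_erase_iff, hins, List.map_append]
            constructor
            · rintro ⟨hxm, hxh⟩
              obtain ⟨h1, h2, h3⟩ := (inv.hheapMem x).1 hxh
              refine ⟨h1, h2, ?_⟩
              intro hxv
              rcases List.mem_append.1 hxv with h | h
              · exact h3 h
              · simp only [List.map_cons, List.map_nil, List.mem_singleton] at h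
                exact hxm h
            · rintro ⟨h1, h2, h3⟩
              have hxv : x ∉ seats.items.map (fun p => p.2) := fun h => h3 (List.mem_append_left _ h)
              have hxm : x ≠ m := by
                intro he
                exact h3 (List.mem_append_right _ (by simp [he]))
              exact ⟨hxm, (inv.hheapMem x).2 ⟨h1, h2, hxv⟩⟩
          · intro k hk hknot f' hf' v hv
            rw [hins, List.map_append] at hknot
            have hknot1 : ((k : Nat) : Int) ∉ seats.items.map (fun p => p.2) :=
              fun h => hknot (List.mem_append_left _ h)
            have hkm : ((k : Nat) : Int) ≠ m := by
              intro he
              exact hknot (List.mem_append_right _ (by simp [he]))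
            have hknat : k ≠ m.toNat := by omega
            rw [List.getElem?_set_ne (Ne.symm hknat)] at hv
            exact inv.hfree k hk hknot1 f' (List.mem_cons_of_mem _ hf') v hv

-- ===== VERDICT (by name: the statement is the Claim_ definition above) =====
-- the initial state satisfies the invariant, so the ports agree
theorem smallestChair_spec : Claim_equal_smallestChair := by
  intro times tgt hdom hpre
  unfold Spec_smallestChair
  show smallestChair times tgt = smallestChair_alt times tgt
  simp only [smallestChair, smallestChair_alt]
  have hraw : (PySem.List.enumerate times).foldl
      (fun acc p => acc ++ [(PySem.List.pyGetD p.2 1 0, 0, p.1), (PySem.List.pyGetD p.2 0 0, 1, p.1)]) []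
      = (PySem.List.pyRange 0 (times.length : Int)).flatMap (EvT times) := by
    rw [PySem.List.foldl_append_eq_flatMap
      (g := fun p : Int × List Int => [(PySem.List.pyGetD p.2 1 0, (0 : Int), p.1), (PySem.List.pyGetD p.2 0 0, (1 : Int), p.1)])]
    rw [List.nil_append, PySem.List.enumerate_eq_map_pyRange times [], List.flatMap_map]
    rfl
  rw [hraw]
  refine sc_main times tgt hpre _ _ _ _ _ ?_
  have hordperm : (PySem.List.sorted (PySem.List.pyRange 0 (times.length : Int))
      (fun f => toLex (PySem.List.pyGetD (PySem.List.pyGetD times f []) 0 0, f))).Perm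
      (PySem.List.pyRange 0 (times.length : Int)) := PySem.List.sorted_perm _ _ _
  have hordnodup := hordperm.nodup_iff.2 (PySem.List.nodup_pyRange_one 0 _)
  have hrawNodup : ((PySem.List.pyRange 0 (times.length : Int)).flatMap (EvT times)).Nodup := by
    rw [List.nodup_flatMap]
    constructor
    · intro x hx
      simp [EvT]
    · refine (PySem.List.pairwise_lt_pyRange_one 0 _).imp ?_
      intro a b hab x hxa hxb
      simp only [EvT, List.mem_cons, List.not_mem_nil, or_false] at hxa hxb
      have ha3 : x.2.2 = a := by rcases hxa with h | h <;> rw [h]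
      have hb3 : x.2.2 = b := by rcases hxb with h' | h' <;> rw [h']
      omega
  have hE0perm := PySem.List.sorted_perm ((PySem.List.pyRange 0 (times.length : Int)).flatMap (EvT times)) evKey false
  have hE0nodup := hE0perm.nodup_iff.2 hrawNodup
  have hE0le := PySem.List.sorted_pairwise ((PySem.List.pyRange 0 (times.length : Int)).flatMap (EvT times)) evKey
  refine ⟨by simp, ?_, ?_, ?_, ?_, by simp [PySem.Dict.empty], by simp [PySem.Dict.empty], ?_, ?_, ?_,
    PySem.List.nodup_pyRange_one 0 _, ?_, ?_⟩
  · -- hperm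
    refine hE0perm.trans ?_
    have hflat : ((PySem.List.pyRange 0 (times.length : Int)).flatMap (EvT times)).Perm
        ((PySem.List.sorted (PySem.List.pyRange 0 (times.length : Int))
          (fun f => toLex (PySem.List.pyGetD (PySem.List.pyGetD times f []) 0 0, f))).flatMap (EvT times)) :=
      List.Perm.flatMap hordperm.symm (fun a _ => List.Perm.refl _)
    simpa [PySem.Dict.empty] using hflat
  · -- hsorted
    refine (hE0le.and hE0nodup).imp ?_
    rintro a b ⟨hle, hne⟩
    exact lt_of_le_of_ne hle (fun h => hne (evKey_inj h))
  · -- hordMem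
    intro f hf
    rw [PySem.List.mem_sorted] at hf
    obtain ⟨h1, h2⟩ := PySem.List.mem_pyRange_one.1 hf
    exact ⟨h1, h2⟩
  · -- hordSorted
    have hple := PySem.List.sorted_pairwise (PySem.List.pyRange 0 (times.length : Int))
      (fun f => toLex (PySem.List.pyGetD (PySem.List.pyGetD times f []) 0 0, f))
    refine ((hple.and hordnodup).imp ?_ : _)
    rintro a b ⟨hle, hne⟩
    refine lt_of_le_of_ne hle (fun h => hne ?_)
    have h2 : (PySem.List.pyGetD (PySem.List.pyGetD times a []) 0 0, a)
        = (PySem.List.pyGetD (PySem.List.pyGetD times b []) 0 0, b) := by simpa using h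
    exact congrArg Prod.snd h2
  · simp [PySem.Dict.empty]
  · simp [PySem.Dict.empty]
  · simp [PySem.Dict.empty]
  · -- hheapMem
    intro x
    simp [PySem.List.mem_pyRange_one, PySem.Dict.empty]
  · -- hfree
    intro k hk hknot f' hf' v hv
    rw [List.getElem?_replicate] at hv
    by_cases h : k < times.length
    · rw [if_pos h] at hv
      exact absurd (Option.some.inj hv) (by simp)
    · rw [if_neg h] at hv
      exact absurd hv (by simp)
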